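-- pv_equiv track=rewrite | github.com/amphionspace/audiollm-server | backend/asr_streaming_session.py | _map_language
-- ===== SOURCE A (Python) =====
-- LANG_CODE_MAP: dict[str, str] = {
--     "zh": "Chinese",
--     "cn": "Chinese",
--     "en": "English",
--     "id": "Indonesian",
--     "th": "Thai",
-- }
--
-- def _map_language(lang_query: str) -> str:
--     code = lang_query.strip().lower()
--     if not code:
--         return "N/A"
--     if code in LANG_CODE_MAP:
--         return LANG_CODE_MAP[code]
--     for full_name in ("Chinese", "English", "Indonesian", "Thai"):
--         if code == full_name.lower():
--             return full_name
--     return "N/A"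
-- ===== SOURCE B (Python) =====
-- # One pass over per-language records (aliases grouped by target language),
-- # replacing A's dict lookup + separate fallback loop; no dict, no empty guard.
-- _LANGS = (
--     (("zh", "cn", "chinese"), "Chinese"),
--     (("en", "english"), "English"),
--     (("id", "indonesian"), "Indonesian"),
--     (("th", "thai"), "Thai"),
-- )
--
-- def _map_language(lang_query: str) -> str:
--     code = lang_query.strip().lower()
--     for aliases, full_name in _LANGS:
--         if code in aliases:
--             return full_name
--     return "N/A"
-- ===== Notes on version B (the rewrite author's own statement) =====
-- stated objective: alternative
-- what changed: B inverts the data layout: instead of A's key-to-name dict lookup followed by a separate fallback scan over the four full names (plus an empty-string guard), B keeps one record per language with all its aliases grouped together and does a single pass over these records, returning the name whose alias set contains the normalized query; the empty string simply matches no alias.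
import Mathlib
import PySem

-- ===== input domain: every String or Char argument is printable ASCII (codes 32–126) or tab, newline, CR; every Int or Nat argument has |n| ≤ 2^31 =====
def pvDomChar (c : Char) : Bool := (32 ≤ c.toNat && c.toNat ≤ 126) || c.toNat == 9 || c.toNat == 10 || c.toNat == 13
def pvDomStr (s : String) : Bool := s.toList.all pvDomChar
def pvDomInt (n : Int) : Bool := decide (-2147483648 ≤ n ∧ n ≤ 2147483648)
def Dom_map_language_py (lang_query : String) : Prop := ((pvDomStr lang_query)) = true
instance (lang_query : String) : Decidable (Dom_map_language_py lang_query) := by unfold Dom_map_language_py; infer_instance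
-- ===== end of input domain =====

-- B groups all aliases per language into one record and does a single scan over the
-- four records, replacing A's dict lookup + guard + separate fallback loop (objective: alternative).

-- ===== PORT A =====
def langCodeMap : PySem.Dict String String :=
  PySem.Dict.ofList [("zh", "Chinese"), ("cn", "Chinese"), ("en", "English"), ("id", "Indonesian"), ("th", "Thai")]

-- the 'for full_name in (...)' fallback loop
def mapLangLoop (code : String) : List String → String
  | [] => "N/A"
  | n :: rest => if code = PySem.Str.lower n then n else mapLangLoop code rest

def map_language_py (lang_query : String) : String :=
  let code := PySem.Str.lower (PySem.Str.strip lang_query)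
  if code = "" then "N/A"
  else
    match langCodeMap.get? code with
    | some v => v
    | none => mapLangLoop code ["Chinese", "English", "Indonesian", "Thai"]

-- ===== PORT B =====
-- one record per language: (its aliases, its full name)
def langRecords : List (List String × String) :=
  [(["zh", "cn", "chinese"], "Chinese"),
   (["en", "english"], "English"),
   (["id", "indonesian"], "Indonesian"),
   (["th", "thai"], "Thai")]

-- the 'for aliases, full_name in _LANGS' loop
def scanRecords (code : String) : List (List String × String) → String
  | [] => "N/A"
  | (aliases, name) :: rest => if aliases.contains code then name else scanRecords code rest

def map_language_py_alt (lang_query : String) : String :=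
  scanRecords (PySem.Str.lower (PySem.Str.strip lang_query)) langRecords

-- ===== PRECONDITION & SPEC =====
def Spec_map_language_py (lang_query : String) (out : String) : Prop := out = map_language_py_alt lang_query
instance (lang_query : String) (out : String) : Decidable (Spec_map_language_py lang_query out) := by unfold Spec_map_language_py; infer_instance

-- ===== CLAIM =====
def Claim_equal_map_language_py : Prop := ∀ (lang_query : String), Dom_map_language_py lang_query → Spec_map_language_py lang_query (map_language_py lang_query)

-- ===== LEMMAS AND PROOFS =====
-- core fact: for ANY normalized code string the two computations agree
lemma core_eq (code : String) :
    (if code = "" then "N/A"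
     else
       match langCodeMap.get? code with
       | some v => v
       | none => mapLangLoop code ["Chinese", "English", "Indonesian", "Thai"]) =
    scanRecords code langRecords := by
  by_cases h0 : code = ""; · subst h0; decide
  by_cases h1 : code = "zh"; · subst h1; decide
  by_cases h2 : code = "cn"; · subst h2; decide
  by_cases h3 : code = "en"; · subst h3; decide
  by_cases h4 : code = "id"; · subst h4; decide
  by_cases h5 : code = "th"; · subst h5; decide
  by_cases h6 : code = "chinese"; · subst h6; decide
  by_cases h7 : code = "english"; · subst h7; decide
  by_cases h8 : code = "indonesian"; · subst h8; decide
  by_cases h9 : code = "thai"; · subst h9; decide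
  -- code matches no key: both sides give "N/A"
  have hA : langCodeMap = PySem.Dict.mk
      [("zh", "Chinese"), ("cn", "Chinese"), ("en", "English"), ("id", "Indonesian"), ("th", "Thai")] := by decide
  have hC : PySem.Str.lower "Chinese" = "chinese" := by decide
  have hE : PySem.Str.lower "English" = "english" := by decide
  have hI : PySem.Str.lower "Indonesian" = "indonesian" := by decide
  have hT : PySem.Str.lower "Thai" = "thai" := by decide
  simp only [hA, langRecords, scanRecords, mapLangLoop, PySem.Dict.get?_mk_cons,
    hC, hE, hI, hT, List.contains_eq_mem, List.mem_cons, List.not_mem_nil, decide_eq_true_eq]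
  simp [beq_iff_eq, PySem.Dict.get?, h1, h2, h3, h4, h5, h6, h7, h8, h9,
    Ne.symm h1, Ne.symm h2, Ne.symm h3, Ne.symm h4, Ne.symm h5]

theorem map_language_py_spec : Claim_equal_map_language_py := by
  intro q _
  show map_language_py q = map_language_py_alt q
  rw [map_language_py, map_language_py_alt]
  exact core_eq (PySem.Str.lower (PySem.Str.strip q))
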